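-- pv_equiv track=rewrite | github.com/adithya1012/LeetCode | amazon_OA7.py | max_opt_days
-- ===== SOURCE A (Python) =====
-- def max_opt_days(dayLimit, Required, Optinal):
--     Required.sort()
--     Optinal.sort()
--     # r, o = len(Required)-1, 0
--     count = 0
--     # while r >= 0 and o < len(Optinal):
--         # if Required[r] + Optinal[o] > dayLimit:
--         #     r+=1
--         # else:
--         #     count += 1
--         #     while o < len(Optinal) and Required[r] + Optinal[o] <= dayLimit:
--     for req in Required:
--         rem_time = dayLimit-req
--         l, r = 0, len(Optinal)-1
--         best_fit_index = -1
--         while l <= r: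
--             mid = (l+r)//2
--             if Optinal[mid] <= rem_time:
--                 l = mid + 1
--                 best_fit_index = mid
--             else:
--                 r = mid - 1
--         if best_fit_index != -1:
--             Optinal.pop(best_fit_index)
--             count += 1
--     return count
-- ===== SOURCE B (Python) =====
-- def max_opt_days(dayLimit, Required, Optinal):
--     # Two-pointer sweep: required ascending, one cursor descending over sorted
--     # optionals; no binary search and no list pops. Does not mutate its inputs.
--     req_sorted = sorted(Required)
--     opt_sorted = sorted(Optinal)
--     j = len(opt_sorted) - 1
--     count = 0
--     for req in req_sorted:
--         rem = dayLimit - req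
--         while j >= 0 and opt_sorted[j] > rem:
--             j -= 1
--         if j >= 0:
--             count += 1
--             j -= 1
--     return count
-- ===== Notes on version B (the rewrite author's own statement) =====
-- stated objective: faster
-- what changed: Replaced A's per-required binary search plus O(m) list.pop over a mutating optional list by a single descending two-pointer sweep over the sorted optional list (no pops, no binary search); valid because remaining times only shrink as required times grow, so skipped optionals can never be matched later.
import Mathlib
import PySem

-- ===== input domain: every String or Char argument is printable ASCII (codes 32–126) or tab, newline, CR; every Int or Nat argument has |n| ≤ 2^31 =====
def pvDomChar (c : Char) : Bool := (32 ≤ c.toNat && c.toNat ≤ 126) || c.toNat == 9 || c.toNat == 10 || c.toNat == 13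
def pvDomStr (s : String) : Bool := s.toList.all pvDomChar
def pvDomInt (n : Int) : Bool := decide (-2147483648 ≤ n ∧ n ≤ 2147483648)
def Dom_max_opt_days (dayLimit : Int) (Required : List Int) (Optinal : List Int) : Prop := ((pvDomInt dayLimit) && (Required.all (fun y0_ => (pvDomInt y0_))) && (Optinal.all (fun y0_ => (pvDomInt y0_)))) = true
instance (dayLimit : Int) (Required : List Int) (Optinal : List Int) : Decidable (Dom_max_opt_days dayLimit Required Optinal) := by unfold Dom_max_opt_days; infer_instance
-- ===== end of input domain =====

-- B replaces A's per-required binary search + O(m) pop by one descending two-pointer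
-- sweep over the sorted optionals (objective: faster). Equivalence is about the RETURN
-- value only: Python A sorts both arguments in place and pops from Optinal; B mutates nothing.

-- ===== PORT A =====
-- inner while-loop of A: binary search for the rightmost index with Optinal[mid] <= rem.
-- fuel only makes the recursion structural; any fuel >= r + 1 - l (A supplies len + 1) is enough.
def pvBSearch (O : List Int) (rem : Int) (fuel : Nat) (l r best : Int) : Int :=
  match fuel with
  | 0 => best
  | fuel + 1 =>
    if l ≤ r then
      let mid := PySem.Int.floordiv (l + r) 2
      match PySem.List.pyGet? O mid with
      | some v =>
          if v ≤ rem then pvBSearch O rem fuel (mid + 1) r mid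
          else pvBSearch O rem fuel l (mid - 1) best
      | none => best  -- unreachable on A's calls (l ≤ mid ≤ r within bounds); Python would raise IndexError
    else best

-- one iteration of A's 'for req in Required' loop; state = (Optinal, count)
def pvAStep (dayLimit : Int) (st : List Int × Int) (req : Int) : List Int × Int :=
  let rem := dayLimit - req
  let bfi := pvBSearch st.1 rem (st.1.length + 1) 0 ((st.1.length : Int) - 1) (-1)
  if bfi ≠ -1 then
    match PySem.List.pop? st.1 bfi with
    | some (_, rest) => (rest, st.2 + 1)
    | none => st  -- unreachable (bfi is a valid index); Python would raise IndexError
  else st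

def max_opt_days (dayLimit : Int) (Required : List Int) (Optinal : List Int) : Int :=
  ((PySem.List.sorted Required (fun x => x) false).foldl (pvAStep dayLimit)
    (PySem.List.sorted Optinal (fun x => x) false, 0)).2

-- ===== PORT B =====
-- B's inner while-loop: move the cursor j down past optionals > rem.
-- fuel only makes the recursion structural; any fuel >= j + 1 (B supplies len + 1) is enough.
def pvSkip (O : List Int) (rem : Int) (fuel : Nat) (j : Int) : Int :=
  match fuel with
  | 0 => j
  | fuel + 1 =>
    if 0 ≤ j then
      match PySem.List.pyGet? O j with
      | some v => if rem < v then pvSkip O rem fuel (j - 1) else j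
      | none => j  -- unreachable on B's calls (j < len O); Python would raise IndexError
    else j

-- one iteration of B's for-loop; state = (j, count)
def pvBStep (dayLimit : Int) (O : List Int) (st : Int × Int) (req : Int) : Int × Int :=
  let rem := dayLimit - req
  let j := pvSkip O rem (O.length + 1) st.1
  if 0 ≤ j then (j - 1, st.2 + 1) else (j, st.2)

def max_opt_days_alt (dayLimit : Int) (Required : List Int) (Optinal : List Int) : Int :=
  let opt := PySem.List.sorted Optinal (fun x => x) false
  ((PySem.List.sorted Required (fun x => x) false).foldl (pvBStep dayLimit opt)
    ((opt.length : Int) - 1, 0)).2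

-- ===== PRECONDITION & SPEC =====
def Spec_max_opt_days (dayLimit : Int) (Required : List Int) (Optinal : List Int) (out : Int) : Prop := out = max_opt_days_alt dayLimit Required Optinal
instance (dayLimit : Int) (Required : List Int) (Optinal : List Int) (out : Int) : Decidable (Spec_max_opt_days dayLimit Required Optinal out) := by unfold Spec_max_opt_days; infer_instance

-- ===== CLAIM (what is proved, stated in full; the proofs are below) =====
def Claim_equal_max_opt_days : Prop := ∀ (dayLimit : Int) (Required : List Int) (Optinal : List Int), Dom_max_opt_days dayLimit Required Optinal → Spec_max_opt_days dayLimit Required Optinal (max_opt_days dayLimit Required Optinal)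


-- ===== LEMMAS AND PROOFS =====

-- A's binary search, run from (l, r, best) with best = l - 1, lands on k - 1, where k is
-- the cut point of rem in L (k = PySem.List.bisectRight L rem on a sorted L).
lemma pv_bsearch_run (L : List Int) (rem : Int) (k : Nat) (_hk : k ≤ L.length)
    (hlow : ∀ (i : Nat) (hi : i < L.length), i < k → L[i] ≤ rem)
    (hhigh : ∀ (i : Nat) (hi : i < L.length), k ≤ i → rem < L[i]) :
    ∀ (n : Nat) (l r best : Int), (r + 1 - l).toNat ≤ n →
      0 ≤ l → r ≤ (L.length : Int) - 1 → l ≤ r + 1 → best = l - 1 →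
      l ≤ (k : Int) → (k : Int) ≤ r + 1 →
      pvBSearch L rem n l r best = (k : Int) - 1 := by
  intro n
  induction n with
  | zero =>
    intro l r best hn h0 hr hlr hbest hlk hkr
    simp only [pvBSearch]
    omega
  | succ n ih =>
    intro l r best hn h0 hr hlr hbest hlk hkr
    simp only [pvBSearch]
    by_cases hle : l ≤ r
    · simp only [if_pos hle]
      have hm := PySem.Int.floordiv_two_mid_bounds (lo := l) (hi := r) hle
      set mid := PySem.Int.floordiv (l + r) 2 with hmid
      have h0m : 0 ≤ mid := by omega
      have h1m : mid < (L.length : Int) := by omega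
      rw [PySem.List.pyGet?_eq_some_getElem L h0m h1m]
      have hmn : mid.toNat < L.length := by omega
      by_cases hv : L[mid.toNat] ≤ rem
      · -- success: mid < k
        have hmk : (mid.toNat : Int) < (k : Int) := by
          by_contra hko
          exact absurd (hhigh mid.toNat hmn (by omega)) (by omega)
        simp only [if_pos hv]
        exact ih (mid + 1) r mid (by omega) (by omega) hr (by omega) (by omega)
          (by omega) hkr
      · -- failure: k ≤ mid
        have hmk : (k : Int) ≤ (mid.toNat : Int) := by
          by_contra hko
          exact absurd (hlow mid.toNat hmn (by omega)) hv
        simp only [if_neg hv]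
        exact ih l (mid - 1) best (by omega) h0 (by omega) (by omega) hbest hlk
          (by omega)
    · simp only [if_neg hle]
      omega

lemma pv_bsearch_spec (L : List Int) (rem : Int) (hs : L.Pairwise (· ≤ ·)) :
    pvBSearch L rem (L.length + 1) 0 ((L.length : Int) - 1) (-1)
      = (PySem.List.bisectRight L rem : Int) - 1 := by
  obtain ⟨hk, hlow, hhigh⟩ := PySem.List.bisectRight_spec L rem hs
  exact pv_bsearch_run L rem _ hk hlow hhigh (L.length + 1) 0 ((L.length : Int) - 1) (-1)
    (by omega) (by omega) (by omega) (by omega) (by omega) (by omega) (by omega)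

-- B's skip loop lands on min j (k - 1) for the same cut point k.
lemma pv_skip_run (O : List Int) (rem : Int) (k : Nat) (_hk : k ≤ O.length)
    (hlow : ∀ (i : Nat) (hi : i < O.length), i < k → O[i] ≤ rem)
    (hhigh : ∀ (i : Nat) (hi : i < O.length), k ≤ i → rem < O[i]) :
    ∀ (n : Nat) (j : Int), (j + 1).toNat ≤ n → j < (O.length : Int) →
      pvSkip O rem n j = min j ((k : Int) - 1) := by
  intro n
  induction n with
  | zero =>
    intro j hn hj
    simp only [pvSkip]
    omega
  | succ n ih =>
    intro j hn hj
    simp only [pvSkip]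
    by_cases h0 : 0 ≤ j
    · simp only [if_pos h0]
      rw [PySem.List.pyGet?_eq_some_getElem O h0 hj]
      have hjn : j.toNat < O.length := by omega
      by_cases hv : rem < O[j.toNat]
      · have hkj : (k : Int) ≤ (j.toNat : Int) := by
          by_contra hko
          exact absurd (hlow j.toNat hjn (by omega)) (by omega)
        simp only [if_pos hv]
        rw [ih (j - 1) (by omega) (by omega)]
        omega
      · have hjk : (j.toNat : Int) < (k : Int) := by
          by_contra hko
          exact absurd (hhigh j.toNat hjn (by omega)) hv
        simp only [if_neg hv]
        omega
    · simp only [if_neg h0]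
      omega

-- a cut point (everything strictly left <= rem, everything right > rem) is unique
lemma pv_cut_unique (L : List Int) (rem : Int) (k1 k2 : Nat)
    (hk1 : k1 ≤ L.length) (hk2 : k2 ≤ L.length)
    (hlow1 : ∀ (i : Nat) (hi : i < L.length), i < k1 → L[i] ≤ rem)
    (hhigh1 : ∀ (i : Nat) (hi : i < L.length), k1 ≤ i → rem < L[i])
    (hlow2 : ∀ (i : Nat) (hi : i < L.length), i < k2 → L[i] ≤ rem)
    (hhigh2 : ∀ (i : Nat) (hi : i < L.length), k2 ≤ i → rem < L[i]) : k1 = k2 := by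
  rcases Nat.lt_trichotomy k1 k2 with h | h | h
  · have h1 : k1 < L.length := by omega
    have := hlow2 k1 h1 h
    have := hhigh1 k1 h1 (le_refl _)
    omega
  · exact h
  · have h2 : k2 < L.length := by omega
    have := hlow1 k2 h2 h
    have := hhigh2 k2 h2 (le_refl _)
    omega

-- the cut point of A's current list L equals min (j+1) (cut point of the full sorted O),
-- given the prefix/suffix invariant tying L to B's cursor j
lemma pv_bisect_eq (L O : List Int) (rem : Int) (j : Int)
    (hsL : L.Pairwise (· ≤ ·)) (hsO : O.Pairwise (· ≤ ·))
    (hm1 : -1 ≤ j) (hjL : j + 1 ≤ (L.length : Int)) (hjO : j + 1 ≤ (O.length : Int))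
    (htake : L.take (j + 1).toNat = O.take (j + 1).toNat)
    (hdrop : ∀ x ∈ L.drop (j + 1).toNat, rem < x) :
    (PySem.List.bisectRight L rem : Int)
      = min (j + 1) (PySem.List.bisectRight O rem : Int) := by
  obtain ⟨hkL, hlowL, hhighL⟩ := PySem.List.bisectRight_spec L rem hsL
  obtain ⟨hkO, hlowO, hhighO⟩ := PySem.List.bisectRight_spec O rem hsO
  set kO := PySem.List.bisectRight O rem with hkOdef
  have hpref : ∀ (i : Nat) (hi : i < L.length) (hij : i < (j + 1).toNat), L[i] = O[i]'(by omega) := by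
    intro i hi hij
    have h1 : (L.take (j + 1).toNat)[i]'(by simp; omega) = L[i] := List.getElem_take
    have h2 : (O.take (j + 1).toNat)[i]'(by simp; omega) = O[i]'(by omega) := List.getElem_take
    rw [← h1, ← h2]
    simp only [htake]
  have heq := pv_cut_unique L rem (PySem.List.bisectRight L rem) (min (j + 1).toNat kO)
    hkL (by omega) hlowL hhighL
    (by
      intro i hi hik
      rw [hpref i hi (by omega)]
      exact hlowO i (by omega) (by omega))
    (by
      intro i hi hik
      by_cases hup : (j + 1).toNat ≤ i
      · -- i lies in the suffix of L, all > rem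
        have hlt : i - (j + 1).toNat < (L.drop (j + 1).toNat).length := by
          simp only [List.length_drop]; omega
        have he : (L.drop (j + 1).toNat)[i - (j + 1).toNat]'hlt = L[i] := by
          rw [List.getElem_drop]
          congr 1
          omega
        have := hdrop _ (List.getElem_mem hlt)
        rwa [he] at this
      · have hkoi : kO ≤ i := by omega
        rw [hpref i hi (by omega)]
        exact hhighO i (by omega) hkoi)
  omega

-- take/drop of eraseIdx at the erased position
lemma pv_take_eraseIdx {α : Type} (L : List α) (n : Nat) :
    (L.eraseIdx n).take n = L.take n := by
  induction L generalizing n with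
  | nil => simp
  | cons a t ih =>
    cases n with
    | zero => simp
    | succ n => simp [List.eraseIdx_cons_succ, ih]

lemma pv_drop_eraseIdx {α : Type} (L : List α) (n : Nat) :
    (L.eraseIdx n).drop n = L.drop (n + 1) := by
  induction L generalizing n with
  | nil => simp
  | cons a t ih =>
    cases n with
    | zero => simp
    | succ n => simp [List.eraseIdx_cons_succ, ih]

-- the loop invariant: running A's remaining required list on state (L, c) and B's on (j, c)
-- yields the same count
lemma pv_main (dayLimit : Int) (O : List Int) (hsO : O.Pairwise (· ≤ ·)) :
    ∀ (Rs L : List Int) (j c : Int),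
      Rs.Pairwise (· ≤ ·) → L.Pairwise (· ≤ ·) →
      -1 ≤ j → j + 1 ≤ (L.length : Int) → j + 1 ≤ (O.length : Int) →
      L.take (j + 1).toNat = O.take (j + 1).toNat →
      (∀ x ∈ L.drop (j + 1).toNat, ∀ r' ∈ Rs, dayLimit - r' < x) →
      (Rs.foldl (pvAStep dayLimit) (L, c)).2 = (Rs.foldl (pvBStep dayLimit O) (j, c)).2 := by
  intro Rs
  induction Rs with
  | nil => intro L j c _ _ _ _ _ _ _; rfl
  | cons req Rs' ih =>
    intro L j c hRs hsL hm1 hjL hjO htake hdrop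
    rw [List.pairwise_cons] at hRs
    obtain ⟨hreq, hRs'⟩ := hRs
    simp only [List.foldl_cons]
    obtain ⟨hkL, hlowL, hhighL⟩ := PySem.List.bisectRight_spec L (dayLimit - req) hsL
    obtain ⟨hkO, hlowO, hhighO⟩ := PySem.List.bisectRight_spec O (dayLimit - req) hsO
    have hbs : pvBSearch L (dayLimit - req) (L.length + 1) 0 ((L.length : Int) - 1) (-1)
        = (PySem.List.bisectRight L (dayLimit - req) : Int) - 1 :=
      pv_bsearch_spec L (dayLimit - req) hsL
    have hsk : pvSkip O (dayLimit - req) (O.length + 1) j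
        = min j ((PySem.List.bisectRight O (dayLimit - req) : Int) - 1) :=
      pv_skip_run O (dayLimit - req) _ hkO hlowO hhighO (O.length + 1) j (by omega) (by omega)
    have hrel : (PySem.List.bisectRight L (dayLimit - req) : Int)
        = min (j + 1) (PySem.List.bisectRight O (dayLimit - req) : Int) :=
      pv_bisect_eq L O (dayLimit - req) j hsL hsO hm1 hjL hjO htake
        (fun x hx => hdrop x hx req (by simp))
    set kL := PySem.List.bisectRight L (dayLimit - req) with hkLdef
    set kO := PySem.List.bisectRight O (dayLimit - req) with hkOdef
    by_cases h1 : 1 ≤ kL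
    · -- a match: A pops index kL - 1, B moves its cursor below min j (kO - 1)
      have hklen : kL - 1 < L.length := by omega
      have hcast : (kL : Int) - 1 = ((kL - 1 : Nat) : Int) := by omega
      have hA : pvAStep dayLimit (L, c) req = (L.eraseIdx (kL - 1), c + 1) := by
        simp only [pvAStep]
        rw [hbs, hcast, if_pos (by omega : ((kL - 1 : Nat) : Int) ≠ -1),
          PySem.List.pop?_natCast L (kL - 1) hklen]
      have hj2 : (0 : Int) ≤ min j ((kO : Int) - 1) := by omega
      have hB : pvBStep dayLimit O (j, c) req = (min j ((kO : Int) - 1) - 1, c + 1) := by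
        simp only [pvBStep]
        rw [hsk, if_pos hj2]
      rw [hA, hB]
      have hlen' : (L.eraseIdx (kL - 1)).length = L.length - 1 := by
        rw [List.length_eraseIdx]
        simp [hklen]
      have hn : (min j ((kO : Int) - 1) - 1 + 1).toNat = kL - 1 := by omega
      refine ih (L.eraseIdx (kL - 1)) (min j ((kO : Int) - 1) - 1) (c + 1) hRs'
        (List.Pairwise.sublist (List.eraseIdx_sublist L (kL - 1)) hsL)
        (by omega) (by rw [hlen']; omega) (by omega) ?_ ?_
      · rw [hn, pv_take_eraseIdx]
        have h1' : L.take (kL - 1) = (L.take (j + 1).toNat).take (kL - 1) := by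
          rw [List.take_take, min_eq_left (by omega)]
        have h2' : O.take (kL - 1) = (O.take (j + 1).toNat).take (kL - 1) := by
          rw [List.take_take, min_eq_left (by omega)]
        rw [h1', h2', htake]
      · rw [hn, pv_drop_eraseIdx]
        intro x hx r' hr'
        obtain ⟨i, hi, hxe⟩ := List.mem_iff_getElem.mp hx
        rw [List.getElem_drop] at hxe
        have hgt : dayLimit - req < x := by
          rw [← hxe]
          exact hhighL _ (by simp at hi; omega) (by omega)
        have := hreq r' hr'
        omega
    · -- no match: A leaves its state unchanged, B parks its cursor at -1
      have h0 : kL = 0 := by omega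
      have hA : pvAStep dayLimit (L, c) req = (L, c) := by
        simp only [pvAStep]
        rw [hbs, if_neg (by omega : ¬ ((kL : Int) - 1 ≠ -1))]
      have hj2 : min j ((kO : Int) - 1) = -1 := by omega
      have hB : pvBStep dayLimit O (j, c) req = (-1, c) := by
        simp only [pvBStep]
        rw [hsk, hj2, if_neg (by omega : ¬ (0 : Int) ≤ -1)]
      rw [hA, hB]
      refine ih L (-1) c hRs' hsL (by omega) (by omega) (by omega)
        (by norm_num) ?_
      intro x hx r' hr'
      have hx' : x ∈ L := by
        have : ((-1 : Int) + 1).toNat = 0 := by omega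
        rwa [this, List.drop_zero] at hx
      obtain ⟨i, hi, hxe⟩ := List.mem_iff_getElem.mp hx'
      have hgt : dayLimit - req < x := by
        rw [← hxe]
        exact hhighL i hi (by omega)
      have := hreq r' hr'
      omega
-- ===== VERDICT (by name: the statement is the Claim_ definition above) =====
theorem max_opt_days_spec : Claim_equal_max_opt_days := by
  intro dayLimit Required Optinal _hdom
  unfold Spec_max_opt_days max_opt_days max_opt_days_alt
  have hsO := PySem.List.sorted_pairwise Optinal (fun x => x)
  have hsR := PySem.List.sorted_pairwise Required (fun x => x)
  set O := PySem.List.sorted Optinal (fun x => x) false with hO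
  refine pv_main dayLimit O hsO _ O ((O.length : Int) - 1) 0 hsR hsO (by omega)
    (by omega) (by omega) rfl ?_
  intro x hx
  have : ((O.length : Int) - 1 + 1).toNat = O.length := by omega
  rw [this, List.drop_length] at hx
  simp at hx
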